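-- pv_equiv track=rewrite | github.com/xmaciejson/university | UWr/WDPP 2024/wdi egzamin.py | zagadka
-- ===== SOURCE A (Python) =====
-- def zagadka(A, x, l, p):
--     if l == p:
--         if A[l] <= x:
--             return A[l]
--         else:
--             return 0
--     if l > p:
--         return 0
--     s = (l + p) // 2
--     if (l + p) % 2 == 0:
--         s -= 1
--     sl = zagadka(A, x, l, s)
--     sr = zagadka(A, x, s + 1, p)
--
--     return sl + sr
-- ===== SOURCE B (Python) =====
-- def zagadka(A, x, l, p):
--     s = 0
--     for i in range(l, p + 1):
--         if A[i] <= x: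
--             s += A[i]
--     return s
-- ===== Notes on version B (the rewrite author's own statement) =====
-- stated objective: simpler
-- what changed: Replaced the divide-and-conquer recursion (with its even/odd midpoint adjustment) by a single iterative accumulator loop over range(l, p+1).
import Mathlib
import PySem

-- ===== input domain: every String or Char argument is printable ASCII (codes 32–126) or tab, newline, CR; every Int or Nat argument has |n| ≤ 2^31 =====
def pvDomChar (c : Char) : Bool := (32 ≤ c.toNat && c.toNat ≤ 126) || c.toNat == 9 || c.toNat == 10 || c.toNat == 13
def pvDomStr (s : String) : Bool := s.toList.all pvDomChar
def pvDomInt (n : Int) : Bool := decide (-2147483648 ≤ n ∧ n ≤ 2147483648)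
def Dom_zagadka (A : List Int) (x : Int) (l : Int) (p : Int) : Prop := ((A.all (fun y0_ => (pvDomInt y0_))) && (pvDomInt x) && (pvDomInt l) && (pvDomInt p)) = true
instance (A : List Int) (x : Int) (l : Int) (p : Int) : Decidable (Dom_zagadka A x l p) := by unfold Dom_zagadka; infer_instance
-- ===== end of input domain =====

-- B replaces the divide-and-conquer recursion by a single accumulator loop over range(l, p+1); objective: simpler.

-- ===== PORT A =====
-- divide-and-conquer, recursing on the midpoint (minus one when l+p is even);
-- the Nat fuel ((p-l).toNat+1 at the top call) is only a totality device: it is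
-- never exhausted, since each recursive call strictly shrinks p-l.
def zagadkaFuel (A : List Int) (x : Int) : Nat → Int → Int → Int
  | 0, _, _ => 0
  | fuel + 1, l, p =>
    if l = p then
      match PySem.List.pyGet? A l with
      | some v => if v ≤ x then v else 0
      | none => 0          -- Python raises IndexError here; excluded by Pre_
    else if l > p then 0
    else
      let s0 := PySem.Int.floordiv (l + p) 2
      let s := if PySem.Int.mod (l + p) 2 = 0 then s0 - 1 else s0
      zagadkaFuel A x fuel l s + zagadkaFuel A x fuel (s + 1) p

def zagadka (A : List Int) (x : Int) (l : Int) (p : Int) : Int :=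
  zagadkaFuel A x ((p - l).toNat + 1) l p

-- ===== PORT B =====
-- one pass: for i in range(l, p+1): if A[i] <= x: s += A[i]
def zagadka_alt (A : List Int) (x : Int) (l : Int) (p : Int) : Int :=
  (PySem.List.pyRange l (p + 1) 1).foldl
    (fun acc i =>
      match PySem.List.pyGet? A i with
      | some v => if v ≤ x then acc + v else acc
      | none => acc)     -- Python raises IndexError here; excluded by Pre_
    0

-- ===== PRECONDITION & SPEC =====
-- Pre_ excludes exactly the inputs where Python A raises IndexError: a nonempty
-- index range l..p containing an index outside [-len(A), len(A)).
def Pre_zagadka (A : List Int) (x : Int) (l : Int) (p : Int) : Prop :=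
  p < l ∨ (-(A.length : Int) ≤ l ∧ p < (A.length : Int))
instance (A : List Int) (x : Int) (l : Int) (p : Int) : Decidable (Pre_zagadka A x l p) := by
  unfold Pre_zagadka; infer_instance

def pvWitness_zagadka : List Int × Int × Int × Int := ([1, 5, 2, 4], 3, 0, 3)

def Spec_zagadka (A : List Int) (x : Int) (l : Int) (p : Int) (out : Int) : Prop := out = zagadka_alt A x l p
instance (A : List Int) (x : Int) (l : Int) (p : Int) (out : Int) : Decidable (Spec_zagadka A x l p out) := by unfold Spec_zagadka; infer_instance

-- ===== CLAIM (what is proved, stated in full; the proofs are below) =====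
def Claim_equal_zagadka : Prop := ∀ (A : List Int) (x : Int) (l : Int) (p : Int), Dom_zagadka A x l p → Pre_zagadka A x l p → Spec_zagadka A x l p (zagadka A x l p)

-- ===== LEMMAS AND PROOFS =====

-- the per-index contribution both programs add up
def pvContrib (A : List Int) (x : Int) (i : Int) : Int :=
  match PySem.List.pyGet? A i with
  | some v => if v ≤ x then v else 0
  | none => 0

theorem zagadka_alt_eq_sum (A : List Int) (x l p : Int) :
    zagadka_alt A x l p = ((PySem.List.pyRange l (p + 1) 1).map (pvContrib A x)).sum := by
  unfold zagadka_alt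
  have h : ∀ (L : List Int) (acc : Int),
      L.foldl (fun acc i =>
        match PySem.List.pyGet? A i with
        | some v => if v ≤ x then acc + v else acc
        | none => acc) acc = acc + (L.map (pvContrib A x)).sum := by
    intro L
    induction L with
    | nil => simp
    | cons hd tl ih =>
      intro acc
      simp only [List.foldl_cons, List.map_cons, List.sum_cons, ih, pvContrib]
      cases PySem.List.pyGet? A hd with
      | none => dsimp only; ring
      | some v => dsimp only; split_ifs <;> ring
  simpa using h _ 0

theorem zagadkaFuel_eq_sum (A : List Int) (x : Int) :
    ∀ (fuel : Nat) (l p : Int), (p - l).toNat < fuel →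
      zagadkaFuel A x fuel l p = ((PySem.List.pyRange l (p + 1) 1).map (pvContrib A x)).sum := by
  intro fuel
  induction fuel with
  | zero => intro l p hn; omega
  | succ n ih =>
    intro l p hn
    rw [zagadkaFuel]
    rcases lt_trichotomy l p with h | h | h
    · simp only [show ¬ l = p by omega, if_neg, show ¬ l > p by omega, not_false_iff]
      have hmid : l ≤ (if PySem.Int.mod (l + p) 2 = 0 then PySem.Int.floordiv (l + p) 2 - 1 else PySem.Int.floordiv (l + p) 2) ∧
          (if PySem.Int.mod (l + p) 2 = 0 then PySem.Int.floordiv (l + p) 2 - 1 else PySem.Int.floordiv (l + p) 2) < p := by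
        rw [PySem.Int.floordiv_eq_ediv_of_pos (by omega), PySem.Int.mod_eq_emod_of_pos (by omega)]
        split_ifs <;> omega
      set s := if PySem.Int.mod (l + p) 2 = 0 then PySem.Int.floordiv (l + p) 2 - 1 else PySem.Int.floordiv (l + p) 2 with hs
      rw [ih l s (by omega), ih (s + 1) p (by omega),
        PySem.List.pyRange_one_append l (s + 1) (p + 1) (by omega) (by omega)]
      simp
    · subst h
      rw [PySem.List.pyRange_one_singleton]
      simp [pvContrib]
    · simp [show ¬ l = p by omega, h, PySem.List.pyRange_one_eq_nil (by omega : p + 1 ≤ l)]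

-- ===== VERDICT (by name: the statement is the Claim_ definition above) =====
theorem zagadka_spec : Claim_equal_zagadka := by
  intro A x l p _ _
  unfold Spec_zagadka
  rw [zagadka_alt_eq_sum, zagadka, zagadkaFuel_eq_sum A x ((p - l).toNat + 1) l p (by omega)]
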